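-- pv_equiv track=rewrite | github.com/vmware-archive/weasel | test/textui_test/sessions_test/sessions.py | setupScreens
-- ===== SOURCE A (Python) =====
-- def setupScreens(screenStream):
--     """Assemble stream of heads and bodies into sequence of streams."""
--     head = None
--     body = None
--     screens = []
--     for fragment in screenStream:
--         if head == None:
--             if fragment.endswith('----\n'):
--                 head = fragment
--                 continue
--             else:
--                 head = ""
--         if body == None:
--             body = fragment
--             screen = head + body
--             screens.append(screen)
--             head = None
--             body = None
--     return screens
-- ===== SOURCE B (Python) =====
-- def setupScreens(screenStream):
--     """Assemble stream of heads and bodies into sequence of streams."""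
--     screens = []
--     it = iter(screenStream)
--     for fragment in it:
--         if fragment.endswith('----\n'):
--             try:
--                 body = next(it)
--             except StopIteration:
--                 break
--             screens.append(fragment + body)
--         else:
--             screens.append(fragment)
--     return screens
-- ===== Notes on version B (the rewrite author's own statement) =====
-- stated objective: simpler
-- what changed: Replaces the None-flag state machine (head/body sentinels with continue-driven re-entry) by a direct iterator pass that consumes a head's body with next() in the same step, appending plain fragments as-is.
import Mathlib
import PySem

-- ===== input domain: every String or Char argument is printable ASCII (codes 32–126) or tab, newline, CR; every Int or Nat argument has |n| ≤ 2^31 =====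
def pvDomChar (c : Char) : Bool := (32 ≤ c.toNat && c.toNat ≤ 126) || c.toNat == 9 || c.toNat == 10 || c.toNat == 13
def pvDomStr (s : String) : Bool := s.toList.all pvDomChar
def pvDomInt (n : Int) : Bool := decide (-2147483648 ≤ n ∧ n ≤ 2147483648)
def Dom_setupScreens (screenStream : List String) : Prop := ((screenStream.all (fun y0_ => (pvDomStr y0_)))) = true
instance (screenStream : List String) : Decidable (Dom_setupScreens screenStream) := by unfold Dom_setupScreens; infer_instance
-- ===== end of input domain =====

-- ===== PORT A =====
-- B replaces A's None-flag state machine by a single pass that pairs each head with the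
-- next fragment directly (objective: simpler).
-- loop body of A: state = (head : Option String, screens); body is always None on entry
def setupScreensStep (st : Option String × List String) (fragment : String) :
    Option String × List String :=
  match st with
  | (none, screens) =>
    if PySem.Str.endswith fragment "----\n" then
      (some fragment, screens)                      -- head = fragment; continue
    else
      (none, screens ++ [("" : String) ++ fragment]) -- head = ""; body = fragment; append; reset
  | (some h, screens) =>
      (none, screens ++ [h ++ fragment])             -- body = fragment; append head+body; reset

def setupScreens (screenStream : List String) : List String :=
  (screenStream.foldl setupScreensStep (none, [])).2

-- ===== PORT B =====
def setupScreens_alt (screenStream : List String) : List String :=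
  match screenStream with
  | [] => []
  | fragment :: rest =>
    if PySem.Str.endswith fragment "----\n" then
      match rest with
      | [] => []                                     -- dangling head: break
      | body :: rest' => (fragment ++ body) :: setupScreens_alt rest'
    else
      fragment :: setupScreens_alt rest

-- ===== PRECONDITION & SPEC =====
def Spec_setupScreens (screenStream : List String) (out : List String) : Prop := out = setupScreens_alt screenStream
instance (screenStream : List String) (out : List String) : Decidable (Spec_setupScreens screenStream out) := by unfold Spec_setupScreens; infer_instance

-- ===== CLAIM (what is proved, stated in full; the proofs are below) =====
def Claim_equal_setupScreens : Prop := ∀ (screenStream : List String), Dom_setupScreens screenStream → Spec_setupScreens screenStream (setupScreens screenStream)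

-- ===== LEMMAS AND PROOFS =====

-- ===== VERDICT (by name: the statement is the Claim_ definition above) =====
-- A's fold starting with no pending head, over any accumulator, appends exactly B's result.
theorem foldl_step_none (screenStream : List String) :
    ∀ (acc : List String),
      (screenStream.foldl setupScreensStep (none, acc)).2 = acc ++ setupScreens_alt screenStream := by
  induction screenStream using setupScreens_alt.induct with
  | case1 => intro acc; simp [setupScreens_alt]
  | case2 f hf => intro acc; simp [PySem.Str.endswith] at hf; simp [setupScreens_alt, setupScreensStep, hf]
  | case3 f hf b r ih => intro acc; simp [PySem.Str.endswith] at hf; simp [setupScreens_alt, setupScreensStep, hf, ih]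
  | case4 f rest hf ih =>
    intro acc
    simp [PySem.Str.endswith] at hf
    rw [setupScreens_alt.eq_def]
    simp [setupScreensStep, PySem.Str.endswith, hf, ih]

theorem setupScreens_spec : Claim_equal_setupScreens := by
  intro l _
  unfold Spec_setupScreens setupScreens
  simpa using foldl_step_none l []
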